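-- pv_equiv track=rewrite | github.com/EddAardvark/Website | python_patterns/code/CircleDrawer.py | constructOctant
-- ===== SOURCE A (Python) =====
-- def constructOctant (radius):
--
--     """
--
--     Construct an octant from the radius, centre = (0,0)
--
--     Radius is converted to an integer
--
--     """
--
--
--
--     x  = int(abs(radius)+0.5)
--
--     y  = 0
--
--     z  = 0
--
--     dx = 2 * x - 1
--
--     dy = 2 * y + 1
--
--
--
-- # We can either move directly up (0,1), or up and to the left (-1,1)
--
--
--
--     points = [(x,y)]
--
--
--
--     while 1:
--
--     # Up (this step is always taken)
--
--
--
--         y  += 1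
--
--         z  += dy
--
--         dy += 2
--
--
--
--     # Left (This step might be taken)
--
--
--
--         x2  = x - 1
--
--         z2  = z - dx
--
--         dx2 = dx - 2
--
--
--
--     # decide which to use
--
--
--
--         if abs(z2) < abs (z):
--
--             x  = x2
--
--             z  = z2
--
--             dx = dx2
--
--
--
--     # finished ?
--
--
--
--         if x < y:
--
--             break ;
--
--
--
--         points.append ((x,y))
--
--
--
--     return points
-- ===== SOURCE B (Python) =====
-- import math
--
-- def constructOctant(radius):
--     """
--     Construct an octant from the radius, centre = (0,0).
--     For each row y, pick x as the nearest integer to sqrt(R*R - y*y)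
--     (computed exactly with math.isqrt) while the point stays in the octant.
--     """
--     R = int(abs(radius) + 0.5)
--     points = []
--     y = 0
--     while True:
--         t = R * R - y * y
--         if t < 0:
--             break
--         c = math.isqrt(t)
--         x = c + 1 if (c + 1) * (c + 1) - t < t - c * c else c
--         if x < y:
--             break
--         points.append((x, y))
--         y += 1
--     return points
-- ===== Notes on version B (the rewrite author's own statement) =====
-- stated objective: alternative
-- what changed: Replaces A's incremental Bresenham-style error accumulator (state x, z, dx, dy updated per row, with a conditional left-step) by a direct per-row computation: for each y, x is the nearest integer to sqrt(R*R - y*y), obtained exactly with math.isqrt.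
import Mathlib
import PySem

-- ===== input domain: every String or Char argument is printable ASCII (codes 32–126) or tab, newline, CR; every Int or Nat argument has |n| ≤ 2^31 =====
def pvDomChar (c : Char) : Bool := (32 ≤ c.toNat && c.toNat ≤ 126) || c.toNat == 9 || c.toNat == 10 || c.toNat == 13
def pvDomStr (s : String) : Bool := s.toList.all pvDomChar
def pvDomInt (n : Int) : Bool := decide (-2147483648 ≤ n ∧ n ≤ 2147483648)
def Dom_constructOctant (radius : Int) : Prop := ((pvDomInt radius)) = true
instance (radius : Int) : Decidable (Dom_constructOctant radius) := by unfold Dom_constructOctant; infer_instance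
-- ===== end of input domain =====

-- B replaces A's incremental Bresenham error accumulator by a direct integer-sqrt
-- computation of each row's x (objective: alternative, same O(R) cost).

-- ===== PORT A =====
-- A's `while 1` loop; state (x, y, z, dx, dy, points), one call = one iteration.
-- The assign-or-not of the `if abs(z2) < abs(z)` block is transcribed as the two
-- recursion branches (same state updates, same order of tests).
def constructOctantLoop (x y z dx dy : Int) (points : List (Int × Int)) : List (Int × Int) :=
  let y' := y + 1
  let z' := z + dy
  let dy' := dy + 2
  let x2 := x - 1
  let z2 := z' - dx
  let dx2 := dx - 2
  if |z2| < |z'| then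
    if x2 < y' then points
    else constructOctantLoop x2 y' z2 dx2 dy' (points ++ [(x2, y')])
  else
    if x < y' then points
    else constructOctantLoop x y' z' dx dy' (points ++ [(x, y')])
termination_by (x + 1 - y).toNat
decreasing_by
  · omega
  · omega

-- `int(abs(radius)+0.5)` = |radius| exactly, for the integer radii of the domain
-- (|radius|+0.5 is exact in a double for |radius| ≤ 2^31 and int() truncates it back).
def constructOctant (radius : Int) : List (Int × Int) :=
  let x := |radius|
  constructOctantLoop x 0 0 (2 * x - 1) (2 * 0 + 1) [(x, 0)]

-- ===== PORT B =====
-- Source B's `while True` loop over y; `math.isqrt t` (t ≥ 0) is Int.sqrt t.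
def constructOctantAltLoop (R y : Int) (points : List (Int × Int)) : List (Int × Int) :=
  let t := R * R - y * y
  if t < 0 then points
  else
    let c := Int.sqrt t
    let x := if (c + 1) * (c + 1) - t < t - c * c then c + 1 else c
    if x < y then points
    else constructOctantAltLoop R (y + 1) (points ++ [(x, y)])
termination_by (|R| + 1 - y).toNat
decreasing_by
  have hy : y ≤ |R| := by nlinarith [abs_nonneg R, le_abs_self R, neg_abs_le R, sq_abs R]
  omega

def constructOctant_alt (radius : Int) : List (Int × Int) :=
  let R := |radius|
  constructOctantAltLoop R 0 []

-- ===== PRECONDITION & SPEC =====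
def Spec_constructOctant (radius : Int) (out : List (Int × Int)) : Prop := out = constructOctant_alt radius
instance (radius : Int) (out : List (Int × Int)) : Decidable (Spec_constructOctant radius out) := by unfold Spec_constructOctant; infer_instance

-- ===== CLAIM (what is proved, stated in full; the proofs are below) =====
def Claim_equal_constructOctant : Prop := ∀ (radius : Int), Dom_constructOctant radius → Spec_constructOctant radius (constructOctant radius)

-- ===== LEMMAS AND PROOFS =====

def PBest (t x : Int) : Prop :=
  0 ≤ x ∧ 2 * t < x * x + (x + 1) * (x + 1) ∧ (1 ≤ x → (x - 1) * (x - 1) + x * x < 2 * t)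
def bval (t : Int) : Int :=
  let c := Int.sqrt t
  if (c + 1) * (c + 1) - t < t - c * c then c + 1 else c
lemma sqrt_lb (t : Int) (ht : 0 ≤ t) : Int.sqrt t * Int.sqrt t ≤ t := by
  have h1 := Nat.sqrt_le' t.toNat
  unfold Int.sqrt; zify at h1; rw [sq] at h1; omega
lemma sqrt_ub (t : Int) (ht : 0 ≤ t) : t < (Int.sqrt t + 1) * (Int.sqrt t + 1) := by
  have h2 := Nat.lt_succ_sqrt' t.toNat
  unfold Int.sqrt; zify at h2; rw [sq] at h2; omega
lemma bval_P (t : Int) (ht : 0 ≤ t) : PBest t (bval t) := by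
  have h0 := Int.sqrt_nonneg t
  have hl := sqrt_lb t ht
  have hu := sqrt_ub t ht
  unfold PBest
  rw [show bval t = (if (Int.sqrt t + 1) * (Int.sqrt t + 1) - t < t - Int.sqrt t * Int.sqrt t then Int.sqrt t + 1 else Int.sqrt t) from rfl]
  set c := Int.sqrt t with hc
  have hexp : (c + 1) * (c + 1) = c * c + 2 * c + 1 := by ring
  have hexp2 : (c + 2) * (c + 2) = c * c + 4 * c + 4 := by ring
  split_ifs with h
  · refine ⟨by omega, by nlinarith, fun _ => by nlinarith⟩
  · refine ⟨h0, by omega, fun h1 => ?_⟩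
    have : (c - 1) * (c - 1) = c * c - 2 * c + 1 := by ring
    omega
lemma greedy_eq (t' x y b' : Int) (ht' : 0 ≤ t') (hy : 0 ≤ y) (hxy : y ≤ x)
    (hPx : PBest (t' + 2 * y + 1) x) (hPb : PBest t' b') (hb : y + 1 ≤ b') :
    (if |(x - 1) * (x - 1) - t'| < |x * x - t'| then x - 1 else x) = b' := by
  obtain ⟨hx0, hx2, hx3⟩ := hPx
  obtain ⟨hb0, hb2, hb3⟩ := hPb
  have hble : b' ≤ x := by
    by_contra hlt
    push_neg at hlt
    have h1 := hb3 (by omega)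
    have h2 := mul_self_le_mul_self hx0 (by omega : x ≤ b' - 1)
    have h3 := mul_self_le_mul_self (by omega : (0:Int) ≤ x + 1) (by omega : x + 1 ≤ b')
    linarith
  rcases eq_or_lt_of_le hble with heq | hlt
  · subst heq
    have h1 := hb3 (by omega)
    rw [if_neg]
    push_neg
    have habs1 : |(b' - 1) * (b' - 1) - t'| = t' - (b' - 1) * (b' - 1) := by
      rw [abs_of_nonpos (by nlinarith)]; ring
    rw [habs1]
    have : |b' * b' - t'| < t' - (b' - 1) * (b' - 1) := by
      rw [abs_lt]; constructor <;> nlinarith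
    linarith
  · rcases eq_or_lt_of_le (by omega : b' ≤ x - 1) with heq | hlt2
    · have h1 := hb3 (by omega)
      rw [if_pos, heq]
      have hxx : x * x - t' > 0 := by nlinarith
      rw [abs_of_pos hxx, abs_lt, ← heq]
      constructor <;> nlinarith
    · exfalso
      have h1 := hx3 (by omega)
      have h2 := mul_self_le_mul_self hb0 (by omega : b' ≤ x - 2)
      have h3 := mul_self_le_mul_self (by omega : (0:Int) ≤ b' + 1) (by omega : b' + 1 ≤ x - 1)
      nlinarith
lemma greedy_lt (t' x y b' : Int) (ht' : 0 ≤ t') (hy : 0 ≤ y) (hxy : y ≤ x)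
    (hPx : PBest (t' + 2 * y + 1) x) (hPb : PBest t' b') (hb : b' < y + 1) :
    (if |(x - 1) * (x - 1) - t'| < |x * x - t'| then x - 1 else x) < y + 1 := by
  obtain ⟨hx0, hx2, hx3⟩ := hPx
  obtain ⟨hb0, hb2, hb3⟩ := hPb
  by_cases hxe : x < y + 1
  · split_ifs <;> omega
  · push_neg at hxe
    have hble : b' ≤ x - 1 := by omega
    rcases eq_or_lt_of_le hble with heq | hlt2
    · -- b' = x - 1 : the greedy step moves left, to b' < y + 1
      subst heq
      have hcond : |(x - 1) * (x - 1) - t'| < |x * x - t'| := by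
        rcases (by omega : x = 1 ∨ 2 ≤ x) with h1 | h1
        · subst h1
          have ht0 : t' = 0 := by nlinarith
          rw [ht0]; norm_num
        · have h2 := hb3 (by omega)
          have hxx : (0:Int) < x * x - t' := by nlinarith
          rw [abs_of_pos hxx, abs_lt]
          constructor <;> nlinarith
      rw [if_pos hcond]
      omega
    · -- b' ≤ x - 2 : forces x = y + 1, and greedy moves left to y
      have h1 := hx3 (by omega)
      have h2 := mul_self_le_mul_self hb0 (by omega : b' ≤ x - 2)
      have h3 := mul_self_le_mul_self (by omega : (0:Int) ≤ b' + 1) (by omega : b' + 1 ≤ x - 1)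
      have hxy1 : x = y + 1 := by nlinarith
      have hx2' : 2 ≤ x := by omega
      rw [if_pos]
      · omega
      · have htlt : t' < (x - 1) * (x - 1) := by nlinarith
        rw [abs_of_nonneg (by nlinarith : (0:Int) ≤ (x-1)*(x-1) - t'),
            abs_of_pos (by nlinarith : (0:Int) < x * x - t')]
        nlinarith

-- one-iteration unfolding lemmas (lets inlined)
lemma loopA_unfold (x y z dx dy : Int) (pts : List (Int × Int)) :
    constructOctantLoop x y z dx dy pts =
      if |z + dy - dx| < |z + dy| then
        if x - 1 < y + 1 then pts
        else constructOctantLoop (x - 1) (y + 1) (z + dy - dx) (dx - 2) (dy + 2) (pts ++ [(x - 1, y + 1)])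
      else
        if x < y + 1 then pts
        else constructOctantLoop x (y + 1) (z + dy) dx (dy + 2) (pts ++ [(x, y + 1)]) := by
  rw [constructOctantLoop]

lemma loopB_unfold (R y : Int) (pts : List (Int × Int)) :
    constructOctantAltLoop R y pts =
      if R * R - y * y < 0 then pts
      else
        if bval (R * R - y * y) < y then pts
        else constructOctantAltLoop R (y + 1) (pts ++ [(bval (R * R - y * y), y)]) := by
  rw [constructOctantAltLoop]; rfl

-- if the next row already lies outside the circle, the whole state is the degenerate R = 0 one
lemma sim_degen_vals (R x y : Int) (hR : 0 ≤ R) (hy : 0 ≤ y) (hyx : y ≤ x)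
    (ht : 0 ≤ R * R - y * y) (hP : PBest (R * R - y * y) x)
    (hneg : R * R - (y + 1) * (y + 1) < 0) : x = 0 ∧ y = 0 ∧ R = 0 := by
  have hyR : y ≤ R := by
    by_contra h
    have h2 := mul_self_le_mul_self (by omega : (0:Int) ≤ R + 1) (by omega : R + 1 ≤ y)
    have h3 : (R + 1) * (R + 1) = R * R + 2 * R + 1 := by ring
    omega
  have hyR' : y = R := by
    by_contra h
    have h2 := mul_self_le_mul_self (by omega : (0:Int) ≤ y + 1) (by omega : y + 1 ≤ R)
    omega
  obtain ⟨h1, h2, h3⟩ := hP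
  have hx0 : x = 0 := by
    by_contra h
    have h4 := h3 (by omega)
    have h5 : R * R - y * y = 0 := by rw [hyR']; ring
    nlinarith [mul_self_nonneg (x - 1), mul_self_nonneg x]
  omega

-- the simulation: from any loop state that A can reach, A's loop and B's loop compute the same list
lemma sim (k : ℕ) : ∀ (R x y z dx dy : Int) (pts : List (Int × Int)),
    (R - y).toNat ≤ k → 0 ≤ R → 0 ≤ y → y ≤ x → 0 ≤ R * R - y * y →
    PBest (R * R - y * y) x → z = x * x + y * y - R * R → dx = 2 * x - 1 → dy = 2 * y + 1 →
    constructOctantLoop x y z dx dy pts = constructOctantAltLoop R (y + 1) pts := by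
  induction k with
  | zero =>
    intro R x y z dx dy pts hk hR hy hyx ht hP hz hdx hdy
    subst hz hdx hdy
    have hyR : y = R := by
      have : y ≤ R := by
        by_contra h
        have h2 := mul_self_le_mul_self (by omega : (0:Int) ≤ R + 1) (by omega : R + 1 ≤ y)
        have h3 : (R + 1) * (R + 1) = R * R + 2 * R + 1 := by ring
        omega
      omega
    have hneg : R * R - (y + 1) * (y + 1) < 0 := by
      have h3 : (y + 1) * (y + 1) = y * y + 2 * y + 1 := by ring
      have h5 : R * R - y * y = 0 := by rw [hyR]; ring
      omega
    obtain ⟨hx0, hy0, hR0⟩ := sim_degen_vals R x y hR hy hyx ht hP hneg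
    subst hx0 hy0 hR0
    rw [loopA_unfold, loopB_unfold]
    norm_num
  | succ n ih =>
    intro R x y z dx dy pts hk hR hy hyx ht hP hz hdx hdy
    subst hz hdx hdy
    by_cases hneg : R * R - (y + 1) * (y + 1) < 0
    · obtain ⟨hx0, hy0, hR0⟩ := sim_degen_vals R x y hR hy hyx ht hP hneg
      subst hx0 hy0 hR0
      rw [loopA_unfold, loopB_unfold]
      norm_num
    · push_neg at hneg
      rw [loopA_unfold, loopB_unfold]
      set t' := R * R - (y + 1) * (y + 1) with ht'
      set b' := bval t' with hb'
      have hPb : PBest t' b' := bval_P t' hneg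
      have hPx' : PBest (t' + 2 * y + 1) x := by
        rw [show t' + 2 * y + 1 = R * R - y * y from by rw [ht']; ring]
        exact hP
      have eA1 : x * x + y * y - R * R + (2 * y + 1) - (2 * x - 1) = (x - 1) * (x - 1) - t' := by
        rw [ht']; ring
      have eA2 : x * x + y * y - R * R + (2 * y + 1) = x * x - t' := by
        rw [ht']; ring
      rw [eA1, eA2]
      rw [if_neg (by omega : ¬ t' < 0)]
      by_cases hby : y + 1 ≤ b'
      · -- next best point is still in the octant: both loops append it and continue
        have hg := greedy_eq t' x y b' hneg hy hyx hPx' hPb hby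
        rw [if_neg (by omega : ¬ b' < y + 1)]
        by_cases hcond : |(x - 1) * (x - 1) - t'| < |x * x - t'|
        · rw [if_pos hcond] at hg ⊢
          rw [if_neg (by omega : ¬ x - 1 < y + 1)]
          rw [hg]
          exact ih R b' (y + 1) (b' * b' - t') (2 * x - 1 - 2) (2 * y + 1 + 2)
            (pts ++ [(b', y + 1)]) (by omega) hR (by omega) hby
            (by rw [← ht']; exact hneg) (by rw [← ht']; exact hPb)
            (by rw [ht']; ring) (by omega) (by ring)
        · rw [if_neg hcond] at hg ⊢
          rw [if_neg (by omega : ¬ x < y + 1), ← hg]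
          exact ih R x (y + 1) (x * x - t') (2 * x - 1) (2 * y + 1 + 2)
            (pts ++ [(x, y + 1)]) (by omega) hR (by omega) (by omega)
            (by rw [← ht']; exact hneg) (by rw [← ht', hg]; exact hPb)
            (by rw [ht']; ring) (by ring) (by ring)
      · -- next best point leaves the octant: both loops stop with the same list
        push_neg at hby
        have hglt := greedy_lt t' x y b' hneg hy hyx hPx' hPb hby
        rw [if_pos hby]
        by_cases hcond : |(x - 1) * (x - 1) - t'| < |x * x - t'|
        · rw [if_pos hcond] at hglt ⊢
          rw [if_pos hglt]
        · rw [if_neg hcond] at hglt ⊢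
          rw [if_pos hglt]

-- ===== VERDICT (by name: the statement is the Claim_ definition above) =====
theorem constructOctant_spec : Claim_equal_constructOctant := by
  unfold Claim_equal_constructOctant Spec_constructOctant
  intro radius _
  show constructOctantLoop |radius| 0 0 (2 * |radius| - 1) (2 * 0 + 1) [(|radius|, 0)]
      = constructOctantAltLoop |radius| 0 []
  set R := |radius| with hRdef
  have hR0 : 0 ≤ R := abs_nonneg radius
  rw [loopB_unfold]
  rw [if_neg (by nlinarith [mul_self_nonneg R] : ¬ R * R - 0 * 0 < 0)]
  have hbv : bval (R * R - 0 * 0) = R := by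
    rw [show R * R - 0 * 0 = R * R from by ring]
    rw [show bval (R * R) =
        (if (Int.sqrt (R * R) + 1) * (Int.sqrt (R * R) + 1) - R * R < R * R - Int.sqrt (R * R) * Int.sqrt (R * R)
         then Int.sqrt (R * R) + 1 else Int.sqrt (R * R)) from rfl]
    rw [Int.sqrt_eq, Int.natAbs_of_nonneg hR0]
    rw [if_neg (by nlinarith : ¬ (R + 1) * (R + 1) - R * R < R * R - R * R)]
  rw [hbv, if_neg (by omega : ¬ R < 0)]
  rw [show ([] : List (Int × Int)) ++ [(R, 0)] = [(R, 0)] from by simp]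
  exact sim (R - 0).toNat R R 0 0 (2 * R - 1) (2 * 0 + 1) [(R, 0)] (le_refl _) hR0 (le_refl 0)
    hR0 (by nlinarith [mul_self_nonneg R]) ⟨hR0, by nlinarith, fun h => by nlinarith⟩
    (by ring) rfl rfl
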